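-- pv_equiv track=rewrite | github.com/matko031/joy_VUB | deel_1_computerwetenschappen_juist.py | aantal_meeren
-- ===== SOURCE A (Python) =====
-- def aantal_meeren(W, B=None):
--     # B=None wilt zeggen dat wanneer je functie aantal_meeren gebruukt, je tweede argument niet moet geven, omdat bodemlijst helemaal niet nodig is voor deze functie
--     # als je dus tweede argument geeft, dan is B gelijk aan die tweede argument, en als je hem niet geeft (wat eigenlijk de bedoeling is), dan is B gewoon gelijk aan None
--     # in principe, kan je die B=None gewoon weglaten, maar in de opdracht stond dat je bodem als parameter in aantal_meeren moest gebruiken, dus ik heb het erbij gezet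
--
--     # er wordt aangenomen dat 'gesloten' meeren niet mogelijk zijn (dus dat je water hebt dat van alle vier kanten omringd is door bodem)
--     #
--     #   bbbbbbbbbbbb
--     #   bbb wwww bbb
--     #   bbb wwww bbb
--     #   bbbbbbbbbbbb - zoiets bedoel ik met 'gesloten' meer
--
--
--     # size is de grootte van het spelbord, het kon even goed len()
--     # pos is de startpositie en is gelijk aan nul omdat je start te tellen aan het linker kant van het bord
--     # aantal is in het begin gelijk aan 0 en bij elke nieuwe meer wordt die met 1 verhoogd
--
--     size = len(W)
--     pos=0
--     aantal = 0
--
--     # we gaan deze loop uitvoeren totdat pos gelijk wordt aan size (op het einde van de elke uitvoering van de loop, wordt pos met 1 verhoogd)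
--     while pos < size:
--         # als er op huidige positie geen water is, gebeurt er niets en we kijken gewoon de volgende positie
--         if W[pos] == 0:
--             pos +=1
--
--         # indien er op huidige positie wel water is, wil dat zeggen dat we een nieuwe meer zijn tegengekomen en dus aantal meeren wordt verhoogd met 1
--         else:
--             aantal += 1
--             # we gaan naar de volgende positie
--             pos +=1
--             # we blijven gaan naar de volgende positie zolang er op de huidige positie water anawezig is (want dat wil zeggen dat het nog steeds over zelfde meer gaat)
--             while pos < size and is_meer(pos, W):
--                 pos +=1
--
--     # op het einde, geeft de functie totaal aantal meeren
--     return aantal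
--
-- def is_meer (i, W, B=None):
--     # voor een bepaalde positie i, gaat deze functie checken, of er een meer op die positie aanwezig is
--
--     # als het waterniveau in kolom i, niet gelijk is aan nul, dan is er een meer in kolom i, anders niet
--     if W[i] != 0:
--         return True
--
--     else:
--         return False
-- ===== SOURCE B (Python) =====
-- def aantal_meeren(W, B=None):
--     # one pass: a lake starts wherever a nonzero cell follows a zero cell (or the start)
--     aantal = 0
--     prev = 0
--     for w in W:
--         if w != 0 and prev == 0:
--             aantal += 1
--         prev = w
--     return aantal
-- ===== Notes on version B (the rewrite author's own statement) =====
-- stated objective: simpler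
-- what changed: B replaces A's position index with nested while loops (outer scan plus inner run-skipping loop) by a single for loop over the elements that counts a lake exactly when a nonzero cell follows a zero cell or the start, tracking only the previous cell.
import Mathlib
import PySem

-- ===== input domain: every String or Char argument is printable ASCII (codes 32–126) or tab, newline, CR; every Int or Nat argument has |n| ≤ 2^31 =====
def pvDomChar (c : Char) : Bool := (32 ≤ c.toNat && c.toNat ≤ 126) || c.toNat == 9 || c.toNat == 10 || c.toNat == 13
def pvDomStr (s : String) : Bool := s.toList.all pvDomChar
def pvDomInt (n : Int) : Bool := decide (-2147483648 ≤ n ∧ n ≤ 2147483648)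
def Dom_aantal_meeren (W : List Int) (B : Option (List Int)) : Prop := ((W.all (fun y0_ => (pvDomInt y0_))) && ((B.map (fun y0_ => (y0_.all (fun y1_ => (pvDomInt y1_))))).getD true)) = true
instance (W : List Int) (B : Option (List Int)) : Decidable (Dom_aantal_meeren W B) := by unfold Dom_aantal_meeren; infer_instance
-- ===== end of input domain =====

-- B is a simpler single for-loop tracking the previous cell, replacing A's index scan with a nested run-skipping while loop; return values proved equal on all inputs.

-- ===== PORT A =====
-- helper is_meer: W[i] != 0 (i is always in range where A calls it)
def is_meer (i : Nat) (W : List Int) (B : Option (List Int)) : Bool :=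
  if W.getD i 0 ≠ 0 then true else false

-- inner while: 'while pos < size and is_meer(pos, W): pos += 1'
def aInner (W : List Int) (size pos : Nat) : Nat :=
  if _h : pos < size then
    if is_meer pos W none then aInner W size (pos + 1) else pos
  else pos
termination_by size - pos

-- termination lemma for the outer loop: the inner while never moves pos backwards
theorem aInner_ge (W : List Int) (size pos : Nat) : pos ≤ aInner W size pos := by
  fun_induction aInner W size pos with
  | case1 _ _ _ ih => omega
  | case2 => omega
  | case3 => omega

-- outer while over the position index
def aOuter (W : List Int) (size pos : Nat) (aantal : Int) : Int :=
  if _h : pos < size then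
    if W.getD pos 0 == 0 then
      aOuter W size (pos + 1) aantal
    else
      aOuter W size (aInner W size (pos + 1)) (aantal + 1)
  else aantal
termination_by size - pos
decreasing_by
  · omega
  · have h1 := aInner_ge W size (pos + 1)
    omega

def aantal_meeren (W : List Int) (B : Option (List Int)) : Int :=
  aOuter W W.length 0 0

-- ===== PORT B =====
def bLoop (W : List Int) (prev aantal : Int) : Int :=
  match W with
  | [] => aantal
  | w :: rest => bLoop rest w (if w ≠ 0 ∧ prev = 0 then aantal + 1 else aantal)

def aantal_meeren_alt (W : List Int) (B : Option (List Int)) : Int :=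
  bLoop W 0 0

-- ===== PRECONDITION & SPEC =====
def Spec_aantal_meeren (W : List Int) (B : Option (List Int)) (out : Int) : Prop := out = aantal_meeren_alt W B
instance (W : List Int) (B : Option (List Int)) (out : Int) : Decidable (Spec_aantal_meeren W B out) := by unfold Spec_aantal_meeren; infer_instance

-- ===== CLAIM (what is proved, stated in full; the proofs are below) =====
def Claim_equal_aantal_meeren : Prop := ∀ (W : List Int) (B : Option (List Int)), Dom_aantal_meeren W B → Spec_aantal_meeren W B (aantal_meeren W B)

-- ===== LEMMAS AND PROOFS =====

theorem aInner_le (W : List Int) (size pos : Nat) (h : pos ≤ size) :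
    aInner W size pos ≤ size := by
  fun_induction aInner W size pos with
  | case1 _ _ _ ih => exact ih (by omega)
  | case2 p hlt _ => omega
  | case3 => omega

theorem bLoop_acc (W : List Int) (prev c : Int) : bLoop W prev c = c + bLoop W prev 0 := by
  induction W generalizing prev c with
  | nil => simp [bLoop]
  | cons w rest ih =>
    simp only [bLoop]
    rw [ih, ih w (if w ≠ 0 ∧ prev = 0 then 0 + 1 else 0)]
    split_ifs <;> ring

-- skipping a water run: with a nonzero previous cell, bLoop counts nothing until a zero cell,
-- which is exactly where aInner stops.
theorem bLoop_inner (W : List Int) (pos : Nat) :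
    pos ≤ W.length → ∀ prev : Int, prev ≠ 0 →
    bLoop (W.drop pos) prev 0 = bLoop (W.drop (aInner W W.length pos)) 0 0 := by
  fun_induction aInner W W.length pos with
  | case1 p hlt hm ih =>
    intro h prev hprev
    have hval : W.getD p 0 = W[p] := by simp [List.getD, List.getElem?_eq_getElem hlt]
    have hget : W[p] ≠ 0 := by
      intro hc
      simp only [is_meer] at hm
      rw [hval, if_neg (by simpa using hc)] at hm
      exact Bool.false_ne_true hm
    have hdrop : W.drop p = W[p] :: W.drop (p + 1) := List.drop_eq_getElem_cons hlt
    rw [hdrop, bLoop, if_neg (by tauto)]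
    exact ih (by omega) W[p] hget
  | case2 p hlt hm =>
    intro h prev hprev
    have hval : W.getD p 0 = W[p] := by simp [List.getD, List.getElem?_eq_getElem hlt]
    have hget : W[p] = 0 := by
      by_contra hc
      exact hm (by simp only [is_meer]; rw [hval, if_pos hc])
    have hdrop : W.drop p = W[p] :: W.drop (p + 1) := List.drop_eq_getElem_cons hlt
    rw [hdrop, bLoop, bLoop]
    rw [if_neg (by rw [hget]; tauto), if_neg (by rw [hget]; tauto), hget]
  | case3 p hge =>
    intro h prev hprev
    have : p = W.length := by omega
    subst this
    simp [bLoop]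

theorem aOuter_eq (W : List Int) (pos : Nat) (c : Int) (h : pos ≤ W.length) :
    aOuter W W.length pos c = c + bLoop (W.drop pos) 0 0 := by
  fun_induction aOuter W W.length pos c with
  | case1 p c hlt hz ih =>
    have hval : W.getD p 0 = W[p] := by simp [List.getD, List.getElem?_eq_getElem hlt]
    have hget : W[p] = 0 := by rw [← hval]; simpa using hz
    have hdrop : W.drop p = W[p] :: W.drop (p + 1) := List.drop_eq_getElem_cons hlt
    rw [ih (by omega), hdrop, bLoop]
    rw [if_neg (by rw [hget]; tauto), hget]
  | case2 p c hlt hz ih =>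
    have hval : W.getD p 0 = W[p] := by simp [List.getD, List.getElem?_eq_getElem hlt]
    have hget : W[p] ≠ 0 := by rw [← hval]; simpa using hz
    have hdrop : W.drop p = W[p] :: W.drop (p + 1) := List.drop_eq_getElem_cons hlt
    rw [ih (aInner_le W W.length (p + 1) (by omega))]
    rw [hdrop, bLoop, if_pos ⟨hget, rfl⟩]
    rw [bLoop_acc (W.drop (p + 1)) W[p] (0 + 1)]
    rw [bLoop_inner W (p + 1) (by omega) W[p] hget]
    ring
  | case3 p c hge =>
    have : p = W.length := by omega
    subst this
    simp [bLoop]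

-- ===== VERDICT (by name: the statement is the Claim_ definition above) =====
theorem aantal_meeren_spec : Claim_equal_aantal_meeren := by
  intro W B _
  unfold Spec_aantal_meeren aantal_meeren aantal_meeren_alt
  rw [aOuter_eq W 0 0 (by omega)]
  simp
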